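-- pv_equiv track=rewrite | github.com/huyvuong1109/GR2 | system/ocr/hybrid_ocr_model.py | _charclass_signature
-- ===== SOURCE A (Python) =====
-- def _charclass_signature(s: str) -> str:
--     s = (s or "")
--     digs = sum(ch.isdigit() for ch in s)
--     alphas = sum(ch.isalpha() for ch in s)
--     other = max(0, len(s) - digs - alphas)
--
--     parts = []
--     if digs:
--         parts.append("D")
--     if alphas:
--         parts.append("A")
--     if other:
--         parts.append("O")
--     return "".join(parts) or "E"
-- ===== SOURCE B (Python) =====
-- def _charclass_signature(s: str) -> str:
--     has_d = has_a = has_o = False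
--     for ch in (s or ""):
--         if ch.isdigit():
--             has_d = True
--         elif ch.isalpha():
--             has_a = True
--         else:
--             has_o = True
--     out = []
--     if has_d:
--         out.append("D")
--     if has_a:
--         out.append("A")
--     if has_o:
--         out.append("O")
--     return "".join(out) or "E"
-- ===== Notes on version B (the rewrite author's own statement) =====
-- stated objective: simpler
-- what changed: Replaces the three full counting passes (two generator sums plus a len-minus-counts max) with one loop over the string maintaining three presence flags; the flags, not counts, decide which letters appear.
import Mathlib
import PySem

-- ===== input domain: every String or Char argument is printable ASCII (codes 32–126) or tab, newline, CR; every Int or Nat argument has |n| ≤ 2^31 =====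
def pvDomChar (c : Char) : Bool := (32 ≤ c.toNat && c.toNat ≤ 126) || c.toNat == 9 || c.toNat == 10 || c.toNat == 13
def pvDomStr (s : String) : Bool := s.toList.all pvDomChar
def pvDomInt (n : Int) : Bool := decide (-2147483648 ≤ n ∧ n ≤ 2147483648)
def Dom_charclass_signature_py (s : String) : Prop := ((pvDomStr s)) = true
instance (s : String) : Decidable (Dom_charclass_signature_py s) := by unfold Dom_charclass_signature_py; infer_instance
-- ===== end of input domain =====

-- B replaces A's three counting passes by a single loop keeping three presence flags (simpler, one pass).

-- ===== PORT A =====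
def charclass_signature_py (s : String) : String :=
  let cs := s.toList
  let digs : Int := (cs.map (fun ch => if PySem.Chars.isdigit ch then (1 : Int) else 0)).sum
  let alphas : Int := (cs.map (fun ch => if PySem.Chars.isalpha ch then (1 : Int) else 0)).sum
  let other : Int := max 0 ((cs.length : Int) - digs - alphas)
  let parts : List String :=
    ((if digs ≠ 0 then ["D"] else []) ++ (if alphas ≠ 0 then ["A"] else [])) ++
      (if other ≠ 0 then ["O"] else [])
  let joined := PySem.Str.join "" parts
  if joined = "" then "E" else joined

-- ===== PORT B =====
def charclass_signature_py_alt (s : String) : String :=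
  let f := s.toList.foldl
    (fun (fl : Bool × Bool × Bool) ch =>
      if PySem.Chars.isdigit ch then (true, fl.2.1, fl.2.2)
      else if PySem.Chars.isalpha ch then (fl.1, true, fl.2.2)
      else (fl.1, fl.2.1, true))
    (false, false, false)
  let out : List String :=
    ((if f.1 then ["D"] else []) ++ (if f.2.1 then ["A"] else [])) ++
      (if f.2.2 then ["O"] else [])
  let joined := PySem.Str.join "" out
  if joined = "" then "E" else joined

-- ===== PRECONDITION & SPEC =====
def Spec_charclass_signature_py (s : String) (out : String) : Prop := out = charclass_signature_py_alt s
instance (s : String) (out : String) : Decidable (Spec_charclass_signature_py s out) := by unfold Spec_charclass_signature_py; infer_instance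

-- ===== CLAIM (what is proved, stated in full; the proofs are below) =====
def Claim_equal_charclass_signature_py : Prop := ∀ (s : String), Dom_charclass_signature_py s → Spec_charclass_signature_py s (charclass_signature_py s)

-- ===== LEMMAS AND PROOFS =====

-- In Python (and in PySem) a digit character is never alphabetic.
theorem pv_digit_not_alpha (c : Char) (h : PySem.Chars.isdigit c = true) :
    PySem.Chars.isalpha c = false := by
  simp only [PySem.Chars.isdigit, Bool.and_eq_true, decide_eq_true_eq, PySem.Chars.isalpha,
    Bool.or_eq_false_iff, PySem.Chars.isupper, PySem.Chars.islower, Bool.and_eq_false_iff,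
    decide_eq_false_iff_not, Char.le_def, UInt32.le_iff_toNat_le] at *
  have e0 : '0'.val.toNat = 48 := rfl
  have e9 : '9'.val.toNat = 57 := rfl
  have eA : 'A'.val.toNat = 65 := rfl
  have eZ : 'Z'.val.toNat = 90 := rfl
  have ea : 'a'.val.toNat = 97 := rfl
  have ez : 'z'.val.toNat = 122 := rfl
  omega

-- length splits into the three disjoint character-class counts
theorem pv_len_split (cs : List Char) :
    (cs.length : Int) - cs.countP PySem.Chars.isdigit - cs.countP PySem.Chars.isalpha
      = cs.countP (fun c => !PySem.Chars.isdigit c && !PySem.Chars.isalpha c) := by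
  induction cs with
  | nil => simp
  | cons c cs ih =>
    by_cases hd : PySem.Chars.isdigit c = true
    · simp [hd, pv_digit_not_alpha c hd]; omega
    · by_cases ha : PySem.Chars.isalpha c = true
      · simp [hd, ha]; omega
      · simp [hd, ha]; omega

theorem pv_cnt_ne_zero (cs : List Char) (p : Char → Bool) :
    (((cs.countP p : Int)) ≠ 0) = (cs.any p = true) := by
  simp [List.any_eq_true, ← List.countP_pos_iff]

theorem pv_fold_flags (cs : List Char) (fl : Bool × Bool × Bool) :
    cs.foldl
      (fun (fl : Bool × Bool × Bool) ch =>
        if PySem.Chars.isdigit ch then (true, fl.2.1, fl.2.2)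
        else if PySem.Chars.isalpha ch then (fl.1, true, fl.2.2)
        else (fl.1, fl.2.1, true)) fl
    = (fl.1 || cs.any PySem.Chars.isdigit,
       fl.2.1 || cs.any PySem.Chars.isalpha,
       fl.2.2 || cs.any (fun c => !PySem.Chars.isdigit c && !PySem.Chars.isalpha c)) := by
  induction cs generalizing fl with
  | nil => simp
  | cons c cs ih =>
    by_cases hd : PySem.Chars.isdigit c = true
    · simp [hd, ih, pv_digit_not_alpha c hd]
    · by_cases ha : PySem.Chars.isalpha c = true
      · simp [hd, ha, ih]
      · simp [hd, ha, ih]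

theorem pv_sum_eq_countP (cs : List Char) (p : Char → Bool) :
    (cs.map (fun ch => if p ch then (1 : Int) else 0)).sum = cs.countP p := by
  induction cs with
  | nil => simp
  | cons c cs ih =>
    by_cases h : p c = true
    · simp [h, ih]; omega
    · simp [h, ih]

-- ===== VERDICT (by name: the statement is the Claim_ definition above) =====
theorem charclass_signature_py_spec : Claim_equal_charclass_signature_py := by
  intro s _
  unfold Spec_charclass_signature_py charclass_signature_py charclass_signature_py_alt
  simp only [pv_sum_eq_countP, pv_fold_flags, Bool.false_or]
  rw [show (max 0 ((s.toList.length : Int) - s.toList.countP PySem.Chars.isdigit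
        - s.toList.countP PySem.Chars.isalpha))
      = (s.toList.countP (fun c => !PySem.Chars.isdigit c && !PySem.Chars.isalpha c) : Int) by
    rw [pv_len_split]; exact max_eq_right (by positivity)]
  simp only [pv_cnt_ne_zero]
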